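-- pv_equiv track=rewrite | github.com/Yeongbi-Na/STUDY | Python/ex-08-sales-summary-main/practice.py | sales_summary
-- ===== SOURCE A (Python) =====
-- from collections import OrderedDict
--
-- def sales_summary(data):
--     #===== write your code below ====
--
--     sorted_dict=OrderedDict(sorted(data.items(), key = lambda x:x[1], reverse=True))
--     temp_rank=list(range(1,len(sorted_dict)+1))
--     temp_values=list(sorted_dict.values())
--     for i in range(len(sorted_dict)-1):
--         if temp_values[i]==temp_values[i+1]:
--             temp_rank[i+1]=temp_rank[i]
--
--     result=list(zip(sorted_dict.keys(),sorted_dict.values(),temp_rank))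
--
--
--     return result
-- ===== SOURCE B (Python) =====
-- def sales_summary(data):
--     items = sorted(data.items(), key=lambda x: x[1], reverse=True)
--     values = [v for _, v in items]
--     return [(k, v, 1 + sum(1 for u in values if u > v)) for k, v in items]
-- ===== Notes on version B (the rewrite author's own statement) =====
-- stated objective: simpler
-- what changed: After the same stable descending sort, each rank is computed independently by the closed form 1 + (count of strictly greater values), replacing A's OrderedDict construction and sequential propagation over a mutable rank array built from range().
import Mathlib
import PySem

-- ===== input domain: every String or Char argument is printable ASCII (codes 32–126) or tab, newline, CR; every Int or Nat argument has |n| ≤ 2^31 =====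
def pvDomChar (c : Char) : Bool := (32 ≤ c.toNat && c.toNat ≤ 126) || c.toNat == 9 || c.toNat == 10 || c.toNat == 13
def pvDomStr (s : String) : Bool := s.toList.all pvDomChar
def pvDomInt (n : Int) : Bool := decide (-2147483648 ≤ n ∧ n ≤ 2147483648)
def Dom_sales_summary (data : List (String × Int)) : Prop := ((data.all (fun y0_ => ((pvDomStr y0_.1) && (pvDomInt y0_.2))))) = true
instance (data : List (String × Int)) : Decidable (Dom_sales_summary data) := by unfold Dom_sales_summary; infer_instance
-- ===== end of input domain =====

-- B replaces A's OrderedDict construction and sequential rank propagation by a per-element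
-- closed form (rank = 1 + count of strictly greater values) over the same stable sort; equal on
-- assoc lists with distinct keys (the ones that represent A's dict parameter).


-- ===== PORT A =====
def sales_summary (data : List (String × Int)) : List (String × Int × Int) :=
  let sorted_dict : PySem.Dict String Int :=
    PySem.Dict.ofList (PySem.List.sorted data (fun x => x.2) true)
  let temp_rank : List Int :=
    PySem.List.pyRange 1 ((sorted_dict.size : Int) + 1) 1
  let temp_values : List Int := sorted_dict.values
  let temp_rank2 : List Int :=
    (PySem.List.pyRange 0 ((sorted_dict.size : Int) - 1) 1).foldl
      (fun tr i =>
        if PySem.List.pyGetD temp_values i 0 == PySem.List.pyGetD temp_values (i + 1) 0 then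
          tr.set (i + 1).toNat (PySem.List.pyGetD tr i 0)
        else tr)
      temp_rank
  (sorted_dict.keys).zip (temp_values.zip temp_rank2)

-- ===== PORT B =====
def sales_summary_alt (data : List (String × Int)) : List (String × Int × Int) :=
  let items := PySem.List.sorted data (fun x => x.2) true
  let values := items.map (fun kv => kv.2)
  items.map (fun kv => (kv.1, kv.2, 1 + (values.countP (fun u => kv.2 < u) : Int)))

-- ===== PRECONDITION & SPEC =====
-- A's parameter is a Python dict: an association list with duplicate keys does not represent any
-- dict input of A, so such lists are excluded (A's port would deduplicate them, B's would not).
def Pre_sales_summary (data : List (String × Int)) : Prop := (data.map Prod.fst).Nodup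
instance (data : List (String × Int)) : Decidable (Pre_sales_summary data) := by
  unfold Pre_sales_summary; infer_instance
def pvWitness_sales_summary : (List (String × Int)) := [("apples", 5), ("pears", 3), ("plums", 5)]
def Spec_sales_summary (data : List (String × Int)) (out : List (String × Int × Int)) : Prop := out = sales_summary_alt data
instance (data : List (String × Int)) (out : List (String × Int × Int)) : Decidable (Spec_sales_summary data out) := by unfold Spec_sales_summary; infer_instance

-- ===== CLAIM (what is proved, stated in full; the proofs are below) =====
def Claim_equal_sales_summary : Prop := ∀ (data : List (String × Int)), Dom_sales_summary data → Pre_sales_summary data → Spec_sales_summary data (sales_summary data)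

-- ===== LEMMAS AND PROOFS =====

-- rank of value v: 1 + number of strictly greater values
def pvCnt (vals : List Int) (v : Int) : Int := (vals.countP (fun u => v < u) : Int)

-- intended rank table after m loop iterations of A
def pvG (vals : List Int) (m : Nat) (j : Int) : Int :=
  if j ≤ (m : Int) then 1 + pvCnt vals (PySem.List.pyGetD vals j 0) else j + 1

theorem pvSet_map_pyRange (n : Nat) (f : Int → Int) (i : Nat) (x : Int) :
    ((PySem.List.pyRange 0 (n : Int) 1).map f).set i x
      = (PySem.List.pyRange 0 (n : Int) 1).map (fun j => if j = (i : Int) then x else f j) := by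
  apply List.ext_getElem
  · simp
  · intro k h1 h2
    simp only [List.getElem_set, List.getElem_map] at *
    have hk : k < n := by simpa [PySem.List.length_pyRange_one] using h2
    by_cases hik : i = k
    · simp [hik]
    · have h2 : ¬ ((0 : Int) + (k : Int) = (i : Int)) := by
        intro hq; apply hik; omega
      rw [if_neg hik, PySem.List.getElem_pyRange_one, if_neg h2]

theorem pvAnti (vals : List Int) (h : vals.Pairwise (fun a b => b ≤ a)) :
    ∀ (i j : Nat) (hi : i < vals.length) (hj : j < vals.length), i ≤ j → vals[j] ≤ vals[i] := by
  intro i j hi hj hij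
  rcases Nat.eq_or_lt_of_le hij with rfl | hlt
  · exact le_refl _
  · exact (List.pairwise_iff_getElem.mp h) i j hi hj hlt

theorem pvCnt_top (vals : List Int) (h : vals.Pairwise (fun a b => b ≤ a)) (hn : 0 < vals.length) :
    pvCnt vals (vals[0]'hn) = 0 := by
  unfold pvCnt
  have : vals.countP (fun u => decide (vals[0]'hn < u)) = 0 := by
    rw [List.countP_eq_zero]
    intro u hu
    rcases List.mem_iff_getElem.mp hu with ⟨k, hk, rfl⟩
    have := pvAnti vals h 0 k hn hk (Nat.zero_le _)
    simp only [decide_eq_true_eq]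
    omega
  simpa using this
theorem pvCnt_step (vals : List Int) (h : vals.Pairwise (fun a b => b ≤ a)) (m : Nat)
    (hm : m + 1 < vals.length)
    (hne : vals[m]'(by omega) ≠ vals[m + 1]'hm) :
    pvCnt vals (vals[m + 1]'hm) = (m : Int) + 1 := by
  have hstrict : vals[m + 1]'hm < vals[m]'(by omega) :=
    lt_of_le_of_ne (pvAnti vals h m (m + 1) (by omega) hm (by omega)) (fun he => hne he.symm)
  obtain ⟨v, hv⟩ : ∃ v, vals[m + 1]'hm = v := ⟨_, rfl⟩
  unfold pvCnt
  rw [hv]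
  have hcount : vals.countP (fun u => decide (v < u)) = m + 1 := by
    conv_lhs => rw [(List.take_append_drop (m + 1) vals).symm]
    rw [List.countP_append]
    have h1 : (vals.take (m + 1)).countP (fun u => decide (v < u)) = m + 1 := by
      have hlen : (vals.take (m + 1)).length = m + 1 := by
        rw [List.length_take]; omega
      rw [List.countP_eq_length.mpr, hlen]
      intro u hu
      rcases List.mem_iff_getElem.mp hu with ⟨k, hk, rfl⟩
      rw [List.getElem_take]
      have hk' : k ≤ m := by rw [hlen] at hk; omega
      have h3 := pvAnti vals h k m (by omega) (by omega) hk'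
      simp only [decide_eq_true_eq]
      omega
    have h2 : (vals.drop (m + 1)).countP (fun u => decide (v < u)) = 0 := by
      rw [List.countP_eq_zero]
      intro u hu
      rcases List.mem_iff_getElem.mp hu with ⟨k, hk, rfl⟩
      rw [List.getElem_drop]
      have hk' : m + 1 + k < vals.length := by
        have := hk; rw [List.length_drop] at this; omega
      have h3 := pvAnti vals h (m + 1) (m + 1 + k) hm hk' (by omega)
      simp only [decide_eq_true_eq]
      omega
    omega
  rw [hcount]; push_cast; ring

theorem pvGetD_range (vals : List Int) (k : Nat) (hk : k < vals.length) :
    PySem.List.pyGetD vals (k : Int) 0 = vals[k]'hk := by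
  simp [PySem.List.pyGetD_natCast, List.getD_eq_getElem?_getD, List.getElem?_eq_getElem hk]

theorem pvLoop_inv (vals : List Int) (h : vals.Pairwise (fun a b => b ≤ a))
    (hn : 0 < vals.length) :
    ∀ m : Nat, m ≤ vals.length - 1 →
      (PySem.List.pyRange 0 (m : Int) 1).foldl
        (fun tr i =>
          if PySem.List.pyGetD vals i 0 == PySem.List.pyGetD vals (i + 1) 0 then
            tr.set (i + 1).toNat (PySem.List.pyGetD tr i 0)
          else tr)
        (PySem.List.pyRange 1 ((vals.length : Int) + 1) 1)
      = (PySem.List.pyRange 0 (vals.length : Int) 1).map (pvG vals m) := by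
  intro m
  induction m with
  | zero =>
    intro _
    have hnil : PySem.List.pyRange 0 (((0 : Nat)) : Int) 1 = [] :=
      PySem.List.pyRange_one_eq_nil (by omega)
    rw [hnil]
    simp only [List.foldl_nil]
    apply List.ext_getElem
    · simp [PySem.List.length_pyRange_one]
    · intro k h1 h2
      have hk : k < vals.length := by
        simp only [PySem.List.length_pyRange_one] at h1; omega
      rw [List.getElem_map, PySem.List.getElem_pyRange_one, PySem.List.getElem_pyRange_one]
      unfold pvG
      by_cases hk0 : k = 0
      · subst hk0
        rw [if_pos (by omega)]
        have h0 : ((0 : Nat) : Int) = (0 : Int) := rfl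
        rw [show ((0 : Int) + ((0 : Nat) : Int)) = ((0 : Nat) : Int) by omega] at *
        rw [pvGetD_range vals 0 hn, pvCnt_top vals h hn]
        omega
      · rw [if_neg (by omega)]
        omega
  | succ m ih =>
    intro hm1
    have hmn : m + 1 < vals.length := by omega
    have hstep : PySem.List.pyRange 0 (((m + 1 : Nat)) : Int) 1
        = PySem.List.pyRange 0 (m : Int) 1 ++ [(m : Int)] := by
      have h0m : (0 : Int) ≤ (m : Int) := by omega
      have := PySem.List.pyRange_one_succ_right (a := 0) (b := (m : Int)) h0m
      push_cast
      exact this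
    rw [hstep, List.foldl_append, ih (by omega)]
    simp only [List.foldl_cons, List.foldl_nil]
    have hvm : PySem.List.pyGetD vals (m : Int) 0 = vals[m]'(by omega) :=
      pvGetD_range vals m (by omega)
    have hvm1 : PySem.List.pyGetD vals ((m : Int) + 1) 0 = vals[m + 1]'hmn := by
      have hc : ((m : Int) + 1) = (((m + 1 : Nat)) : Int) := by push_cast; ring
      rw [hc, pvGetD_range vals (m + 1) hmn]
    have htoNat : ((m : Int) + 1).toNat = m + 1 := by omega
    by_cases heq : vals[m]'(by omega) = vals[m + 1]'hmn
    · rw [if_pos (by rw [hvm, hvm1]; exact beq_iff_eq.mpr heq)]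
      have hGrank : PySem.List.pyGetD
          ((PySem.List.pyRange 0 (vals.length : Int) 1).map (pvG vals m)) (m : Int) 0
          = pvG vals m (m : Int) :=
        PySem.List.pyGetD_map_pyRange_of_nonneg _ _ _ _ (by omega) (by exact_mod_cast (by omega : m < vals.length))
      rw [hGrank, htoNat, pvSet_map_pyRange vals.length (pvG vals m) (m + 1) _]
      apply List.map_congr_left
      intro j hj
      obtain ⟨hj0, hjn⟩ := (PySem.List.mem_pyRange_one).mp hj
      by_cases hjm1 : j = (((m + 1 : Nat)) : Int)
      · rw [if_pos hjm1]
        subst hjm1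
        unfold pvG
        rw [if_pos (by omega), if_pos (by push_cast; omega)]
        have hgj : PySem.List.pyGetD vals (((m + 1 : Nat)) : Int) 0 = vals[m + 1]'hmn :=
          pvGetD_range vals (m + 1) hmn
        rw [hgj, hvm, heq]
      · rw [if_neg hjm1]
        unfold pvG
        by_cases hjle : j ≤ (m : Int)
        · rw [if_pos hjle, if_pos (by push_cast; omega)]
        · rw [if_neg hjle, if_neg (by push_cast at hjm1 ⊢; omega)]
    · rw [if_neg (by rw [hvm, hvm1]; simp [heq])]
      apply List.map_congr_left
      intro j hj
      obtain ⟨hj0, hjn⟩ := (PySem.List.mem_pyRange_one).mp hj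
      unfold pvG
      by_cases hjle : j ≤ (m : Int)
      · rw [if_pos hjle, if_pos (by push_cast; omega)]
      · by_cases hjm1 : j = (m : Int) + 1
        · rw [if_neg hjle, if_pos (by push_cast; omega)]
          subst hjm1
          have hgj : PySem.List.pyGetD vals ((m : Int) + 1) 0 = vals[m + 1]'hmn := hvm1
          rw [hgj, pvCnt_step vals h m hmn heq]
          ring
        · rw [if_neg hjle, if_neg (by push_cast at hjm1 ⊢; omega)]

theorem pvOfList_items (l : List (String × Int)) (h : (l.map Prod.fst).Nodup) :
    (PySem.Dict.ofList l).items = l := by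
  have := PySem.Dict.items_foldl_insert_fresh (l := l) (k := Prod.fst) (v := Prod.snd)
    (d := PySem.Dict.empty) (by simp) h
  simpa [PySem.Dict.ofList] using this

-- ===== VERDICT (by name: the statement is the Claim_ definition above) =====
theorem sales_summary_spec : Claim_equal_sales_summary := by
  intro data _hdom hpre
  unfold Spec_sales_summary sales_summary sales_summary_alt
  set s := PySem.List.sorted data (fun x => x.2) true with hs
  have hperm : s.Perm data := PySem.List.sorted_perm data (fun x => x.2) true
  have hnods : (s.map Prod.fst).Nodup := ((hperm.map Prod.fst).nodup_iff).mpr hpre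
  have hitems : (PySem.Dict.ofList s).items = s := pvOfList_items s hnods
  simp only [PySem.Dict.keys, PySem.Dict.values, PySem.Dict.size, hitems]
  set vals : List Int := s.map (fun kv => kv.2) with hvals
  have hlen : vals.length = s.length := by simp [hvals]
  have hanti : vals.Pairwise (fun a b => b ≤ a) := by
    rw [hvals, List.pairwise_map]
    exact PySem.List.sorted_pairwise_rev data (fun x => x.2)
  rcases Nat.eq_zero_or_pos s.length with hsl | hsl
  · have hse : s = [] := List.length_eq_zero_iff.mp hsl
    rw [hse]
    simp
  · rw [← hlen]
    have hc : ((vals.length : Int) - 1) = (((vals.length - 1 : Nat)) : Int) := by omega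
    rw [hc, pvLoop_inv vals hanti (by omega) (vals.length - 1) (le_refl _)]
    apply List.ext_getElem
    · simp [PySem.List.length_pyRange_one, hlen]
    · intro k h1 h2
      have hk : k < s.length := by simpa using h2
      have hkv : k < vals.length := by omega
      simp only [List.getElem_zip, List.getElem_map, PySem.List.getElem_pyRange_one]
      have hz : (0 : Int) + (k : Int) = ((k : Nat) : Int) := by omega
      rw [hz]
      unfold pvG
      rw [if_pos (by omega), pvGetD_range vals k hkv]
      unfold pvCnt
      have hvk : vals[k]'hkv = (s[k]'hk).2 := by
        simp [hvals]
      rw [hvk]
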